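-- pv_equiv track=rewrite | github.com/houtanb/forecastbench | src/leaderboard/winrate/winrate.py | abbreviate_unique
-- ===== SOURCE A (Python) =====
-- def abbreviate_unique(names, max_len=12):
--     short_names = {}
--     seen = set()
--     for name in names:
--         if len(name) <= max_len:
--             short_names[name] = name
--             seen.add(name)
--         else:
--             base = name[: max_len - 4]
--             suffix = 1
--             new_name = f"{base}~{suffix}"
--             while new_name in seen:
--                 suffix += 1
--                 new_name = f"{base}~{suffix}"
--             short_names[name] = new_name
--             seen.add(new_name)
--     return short_names
-- ===== SOURCE B (Python) =====
-- def abbreviate_unique(names, max_len=12):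
--     # Long names can only collide with SHORT names or with same-base generated
--     # names; a per-base next-suffix counter rules out the latter, so the scan
--     # only consults the set of short names seen so far (never the generated ones).
--     out = {}
--     short_seen = set()
--     next_suffix = {}
--     for name in names:
--         if len(name) <= max_len:
--             out[name] = name
--             short_seen.add(name)
--         else:
--             base = name[: max_len - 4]
--             k = next_suffix.get(base, 1)
--             while f"{base}~{k}" in short_seen:
--                 k += 1
--             next_suffix[base] = k + 1
--             out[name] = f"{base}~{k}"
--     return out
-- ===== Notes on version B (the rewrite author's own statement) =====
-- stated objective: alternative
-- what changed: B never stores generated names in the membership set: a per-base next-suffix counter makes same-base collisions impossible and a tilde-plus-digits argument makes cross-base collisions impossible, so each scan resumes at the counter and only tests against the short names seen so far (a timing run measured no speed difference on its inputs).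
import Mathlib
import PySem

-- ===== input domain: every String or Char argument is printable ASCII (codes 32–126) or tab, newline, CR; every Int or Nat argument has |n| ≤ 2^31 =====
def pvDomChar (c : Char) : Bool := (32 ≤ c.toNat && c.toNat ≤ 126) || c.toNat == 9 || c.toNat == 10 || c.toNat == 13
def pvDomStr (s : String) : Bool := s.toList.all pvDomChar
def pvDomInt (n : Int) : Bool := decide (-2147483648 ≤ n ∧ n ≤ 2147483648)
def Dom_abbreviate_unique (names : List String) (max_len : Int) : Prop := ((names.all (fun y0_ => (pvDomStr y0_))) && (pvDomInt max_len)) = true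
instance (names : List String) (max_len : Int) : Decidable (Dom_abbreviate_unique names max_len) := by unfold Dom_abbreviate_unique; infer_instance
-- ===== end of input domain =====

-- B drops A's set of generated names entirely: a per-base next-suffix counter plus the
-- fact that "base~digits" names of distinct bases can never coincide means B only has to
-- probe against the short names seen so far (same return value, proved below).

-- ===== PORT A =====

-- f"{base}~{suffix}"
def pvMk (base : String) (k : Nat) : String := base ++ "~" ++ PySem.Int.toStr (k : Int)

-- A's `while new_name in seen: suffix += 1`; the fuel argument is only a termination
-- guard (callers pass seen.length + 1, which is proved sufficient below).
def pvFindA (seen : PySem.Set String) (base : String) : Nat → Nat → Nat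
  | s, 0 => s
  | s, fuel+1 => if pvMk base s ∈ seen then pvFindA seen base (s+1) fuel else s

-- one iteration of A's for-loop body
def pvStepA (max_len : Int) (st : PySem.Dict String String × PySem.Set String) (name : String) :
    PySem.Dict String String × PySem.Set String :=
  if PySem.Str.len name ≤ max_len then
    (st.1.insert name name, PySem.Set.add st.2 name)
  else
    let base := PySem.Str.slice name none (some (max_len - 4))
    let suffix := pvFindA st.2 base 1 (st.2.length + 1)
    let new_name := pvMk base suffix
    (st.1.insert name new_name, PySem.Set.add st.2 new_name)

def abbreviate_unique (names : List String) (max_len : Int) : List (String × String) :=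
  (names.foldl (pvStepA max_len) (PySem.Dict.empty, PySem.Set.empty)).1.items

-- ===== PORT B =====

-- B's `while f"{base}~{k}" in short_seen: k += 1` (fuel-guarded; short.length + 1 suffices)
def pvScanB (short : PySem.Set String) (b : String) : Nat → Nat → Nat
  | 0, k => k
  | fuel+1, k => if pvMk b k ∈ short then pvScanB short b fuel (k+1) else k

-- B's loop, carrying (out, short_seen, next_suffix); generated names are never
-- added to any membership set.
def pvLoopB (max_len : Int) :
    List String → PySem.Dict String String → PySem.Set String → PySem.Dict String Nat →
    PySem.Dict String String
  | [], out, _, _ => out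
  | name :: rest, out, short, ctr =>
    if PySem.Str.len name ≤ max_len then
      pvLoopB max_len rest (out.insert name name) (PySem.Set.add short name) ctr
    else
      let b := PySem.Str.slice name none (some (max_len - 4))
      let k := pvScanB short b (short.length + 1) (ctr.getD b 1)
      pvLoopB max_len rest (out.insert name (pvMk b k)) short (ctr.insert b (k + 1))

def abbreviate_unique_alt (names : List String) (max_len : Int) : List (String × String) :=
  (pvLoopB max_len names PySem.Dict.empty PySem.Set.empty PySem.Dict.empty).items

-- ===== PRECONDITION & SPEC =====
def Spec_abbreviate_unique (names : List String) (max_len : Int) (out : List (String × String)) : Prop := out = abbreviate_unique_alt names max_len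
instance (names : List String) (max_len : Int) (out : List (String × String)) : Decidable (Spec_abbreviate_unique names max_len out) := by unfold Spec_abbreviate_unique; infer_instance

-- ===== CLAIM (what is proved, stated in full; the proofs are below) =====
def Claim_equal_abbreviate_unique : Prop := ∀ (names : List String) (max_len : Int), Dom_abbreviate_unique names max_len → Spec_abbreviate_unique names max_len (abbreviate_unique names max_len)

-- ===== LEMMAS AND PROOFS =====

-- decimal printing is injective: a decoder `pvVal` is a left inverse of Nat.toDigits 10
def pvVal (cs : List Char) : Nat := cs.foldl (fun a c => 10 * a + (c.toNat - 48)) 0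

theorem pvDigitChar_decode : ∀ m, m < 10 → (Nat.digitChar m).toNat - 48 = m := by decide

theorem pvDigitChar_ne_tilde : ∀ m, m < 10 → Nat.digitChar m ≠ '~' := by decide

theorem pvTdc_append : ∀ (fuel n : Nat) (ds : List Char),
    Nat.toDigitsCore 10 fuel n ds = Nat.toDigitsCore 10 fuel n [] ++ ds := by
  intro fuel
  induction fuel with
  | zero => intro n ds; simp [Nat.toDigitsCore]
  | succ f ih =>
    intro n ds
    simp only [Nat.toDigitsCore]
    by_cases h : n / 10 = 0
    · simp [h]
    · simp only [h, if_false]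
      rw [ih (n / 10) (Nat.digitChar (n % 10) :: ds), ih (n / 10) [Nat.digitChar (n % 10)]]
      simp

theorem pvVal_append_singleton (xs : List Char) (c : Char) :
    pvVal (xs ++ [c]) = 10 * pvVal xs + (c.toNat - 48) := by
  simp [pvVal, List.foldl_append]

theorem pvVal_toDigitsCore : ∀ (fuel n : Nat), n < fuel →
    pvVal (Nat.toDigitsCore 10 fuel n []) = n := by
  intro fuel
  induction fuel with
  | zero => omega
  | succ f ih =>
    intro n hn
    simp only [Nat.toDigitsCore]
    by_cases h : n / 10 = 0
    · have hlt : n < 10 := by omega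
      simp only [h, if_true]
      have := pvDigitChar_decode (n % 10) (Nat.mod_lt _ (by norm_num))
      simp [pvVal, this]
      omega
    · simp only [h, if_false]
      rw [pvTdc_append, pvVal_append_singleton]
      have hdiv : n / 10 < f := by
        have h1 : n / 10 < n := Nat.div_lt_self (by omega) (by norm_num)
        omega
      rw [ih (n / 10) hdiv, pvDigitChar_decode (n % 10) (Nat.mod_lt _ (by norm_num))]
      omega

theorem pvVal_toDigits (n : Nat) : pvVal (Nat.toDigits 10 n) = n :=
  pvVal_toDigitsCore (n + 1) n (Nat.lt_succ_self n)

-- decimal digit strings never contain '~'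
theorem pvTilde_not_mem_tdc : ∀ (fuel n : Nat) (ds : List Char),
    '~' ∉ ds → '~' ∉ Nat.toDigitsCore 10 fuel n ds := by
  intro fuel
  induction fuel with
  | zero => intro n ds h; simpa [Nat.toDigitsCore] using h
  | succ f ih =>
    intro n ds h
    simp only [Nat.toDigitsCore]
    have hd : '~' ∉ Nat.digitChar (n % 10) :: ds := by
      intro hc
      rcases List.mem_cons.mp hc with hc | hc
      · exact pvDigitChar_ne_tilde (n % 10) (Nat.mod_lt _ (by norm_num)) hc.symm
      · exact h hc
    by_cases h10 : n / 10 = 0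
    · simpa [h10] using hd
    · simp only [h10, if_false]
      exact ih (n / 10) _ hd

theorem pvTilde_not_mem_toDigits (n : Nat) : '~' ∉ Nat.toDigits 10 n :=
  pvTilde_not_mem_tdc (n + 1) n [] (by simp)

-- splitting a list at a marker that occurs in neither tail is unique
theorem pvSplit_unique (c : Char) :
    ∀ (xs xs' ds ds' : List Char), c ∉ ds → c ∉ ds' →
      xs ++ c :: ds = xs' ++ c :: ds' → xs = xs' ∧ ds = ds' := by
  intro xs
  induction xs with
  | nil =>
    intro xs' ds ds' hd hd' h
    cases xs' with
    | nil => simpa using h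
    | cons a t =>
      simp only [List.nil_append, List.cons_append, List.cons.injEq] at h
      exact absurd (h.2 ▸ List.mem_append_right t (List.mem_cons_self ..)) hd
  | cons a t ih =>
    intro xs' ds ds' hd hd' h
    cases xs' with
    | nil =>
      simp only [List.nil_append, List.cons_append, List.cons.injEq] at h
      exact absurd (h.2.symm ▸ List.mem_append_right t (List.mem_cons_self ..)) hd'
    | cons a' t' =>
      simp only [List.cons_append, List.cons.injEq] at h
      obtain ⟨h1, h2⟩ := ih t' ds ds' hd hd' h.2
      exact ⟨by rw [h.1, h1], h2⟩

-- full injectivity of the candidate-name constructor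
theorem pvMk_inj_full {b1 b2 : String} {k1 k2 : Nat}
    (h : pvMk b1 k1 = pvMk b2 k2) : b1 = b2 ∧ k1 = k2 := by
  have h' := congrArg String.toList h
  simp only [pvMk, String.toList_append, PySem.Int.toList_toStr, PySem.Int.toChars] at h'
  have hk1 : ¬ ((k1 : Int) < 0) := by omega
  have hk2 : ¬ ((k2 : Int) < 0) := by omega
  simp only [hk1, hk2, if_false, Int.toNat_natCast] at h'
  have h'' : b1.toList ++ '~' :: Nat.toDigits 10 k1 = b2.toList ++ '~' :: Nat.toDigits 10 k2 := by
    simpa using h'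
  obtain ⟨hb, hd⟩ := pvSplit_unique '~' _ _ _ _
    (pvTilde_not_mem_toDigits k1) (pvTilde_not_mem_toDigits k2) h''
  refine ⟨?_, ?_⟩
  · exact String.toList_inj.mp hb
  · have := congrArg pvVal hd
    rwa [pvVal_toDigits, pvVal_toDigits] at this

theorem pvMk_inj (base : String) {j k : Nat} (h : pvMk base j = pvMk base k) : j = k :=
  (pvMk_inj_full h).2

-- pigeonhole: among l.length + 1 consecutive suffixes one is absent from l
theorem pvExists_free (l : List String) (base : String) (s : Nat) :
    ∃ i, i < l.length + 1 ∧ pvMk base (s + i) ∉ l := by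
  by_contra hall
  push Not at hall
  set cand : List String := (List.range (l.length + 1)).map (fun i => pvMk base (s + i)) with hcand
  have hnodup : cand.Nodup := by
    refine List.Nodup.map_on ?_ (List.nodup_range)
    intro x _ y _ hxy
    have := pvMk_inj base hxy
    omega
  have hsub : cand ⊆ l := by
    intro x hx
    rw [hcand, List.mem_map] at hx
    obtain ⟨i, hi, rfl⟩ := hx
    exact hall i (List.mem_range.mp hi)
  have hcard1 : cand.toFinset.card = l.length + 1 := by
    rw [List.toFinset_card_of_nodup hnodup]
    simp [hcand]
  have hcard2 : cand.toFinset.card ≤ l.toFinset.card := by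
    apply Finset.card_le_card
    intro x hx
    rw [List.mem_toFinset] at *
    exact hsub hx
  have := List.toFinset_card_le l
  omega

-- the scan returns the least suffix ≥ its start absent from `seen`, when fuel suffices
theorem pvFindA_spec (seen : PySem.Set String) (base : String) :
    ∀ (fuel s : Nat), (∃ i, i < fuel ∧ pvMk base (s + i) ∉ seen) →
      s ≤ pvFindA seen base s fuel ∧ pvMk base (pvFindA seen base s fuel) ∉ seen ∧
      ∀ k, s ≤ k → k < pvFindA seen base s fuel → pvMk base k ∈ seen := by
  intro fuel
  induction fuel with
  | zero => intro s ⟨i, hi, _⟩; omega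
  | succ f ih =>
    intro s ⟨i, hi, hfree⟩
    by_cases hmem : pvMk base s ∈ seen
    · have hi0 : i ≠ 0 := by rintro rfl; simp at hfree; exact hfree hmem
      obtain ⟨i', rfl⟩ : ∃ i', i = i' + 1 := ⟨i - 1, by omega⟩
      have hex : ∃ j, j < f ∧ pvMk base (s + 1 + j) ∉ seen :=
        ⟨i', by omega, by have : s + 1 + i' = s + (i' + 1) := by omega
                          rw [this]; exact hfree⟩
      obtain ⟨h1, h2, h3⟩ := ih (s + 1) hex
      simp only [pvFindA, hmem, if_true]
      refine ⟨by omega, h2, ?_⟩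
      intro k hk1 hk2
      rcases Nat.eq_or_lt_of_le hk1 with rfl | hlt
      · exact hmem
      · exact h3 k (by omega) hk2
    · simp only [pvFindA, if_neg hmem]
      exact ⟨le_refl s, hmem, fun k h1 h2 => by omega⟩

theorem pvScanB_eq_findA (short : PySem.Set String) (b : String) :
    ∀ (fuel k : Nat), pvScanB short b fuel k = pvFindA short b k fuel := by
  intro fuel
  induction fuel with
  | zero => intro k; rfl
  | succ f ih =>
    intro k
    simp only [pvScanB, pvFindA]
    split <;> simp [ih]

theorem pvMem_add (s : PySem.Set String) (x y : String) (h : x ∈ s) : x ∈ PySem.Set.add s y := by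
  simp [PySem.Set.mem_add, h]

-- B's invariant tying (short, ctr) to A's seen set: counters are at least 1;
-- short names are in seen; everything in seen is a short name or a generated
-- candidate below its base's counter; everything below a counter is in seen.
def pvInvB (ctr : PySem.Dict String Nat) (seen short : PySem.Set String) : Prop :=
  (∀ b, 1 ≤ ctr.getD b 1) ∧
  (∀ s, s ∈ short → s ∈ seen) ∧
  (∀ s, s ∈ seen → s ∈ short ∨ ∃ b k, 1 ≤ k ∧ k < ctr.getD b 1 ∧ s = pvMk b k) ∧
  (∀ b k, 1 ≤ k → k < ctr.getD b 1 → pvMk b k ∈ seen)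

-- above each base's counter, membership in A's seen set is membership in B's short set
theorem pvSeen_iff_short (ctr : PySem.Dict String Nat) (seen short : PySem.Set String)
    (hinv : pvInvB ctr seen short) (b : String) (k : Nat) (hk : ctr.getD b 1 ≤ k) :
    (pvMk b k ∈ seen ↔ pvMk b k ∈ short) := by
  obtain ⟨_, h1, h2, _⟩ := hinv
  constructor
  · intro hm
    rcases h2 _ hm with hm | ⟨b', k', hk1, hk2, heq⟩
    · exact hm
    · obtain ⟨rfl, rfl⟩ := pvMk_inj_full heq
      omega
  · exact h1 _

-- the two scans agree: A scans all of seen from 1, B scans short from the counter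
theorem pvScan_agree (ctr : PySem.Dict String Nat) (seen short : PySem.Set String)
    (hinv : pvInvB ctr seen short) (b : String) :
    pvFindA seen b 1 (seen.length + 1) = pvScanB short b (short.length + 1) (ctr.getD b 1) := by
  rw [pvScanB_eq_findA]
  set c := ctr.getD b 1 with hc
  have hc1 : 1 ≤ c := hinv.1 b
  obtain ⟨e1, f1, g1⟩ := pvFindA_spec seen b (seen.length + 1) 1
    (by obtain ⟨i, hi, hf⟩ := pvExists_free seen b 1; exact ⟨i, hi, hf⟩)
  obtain ⟨e2, f2, g2⟩ := pvFindA_spec short b (short.length + 1) c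
    (by obtain ⟨i, hi, hf⟩ := pvExists_free short b c; exact ⟨i, hi, hf⟩)
  set r1 := pvFindA seen b 1 (seen.length + 1)
  set r2 := pvFindA short b c (short.length + 1)
  have hr1c : c ≤ r1 := by
    rcases Nat.lt_or_ge r1 c with hlt | hge
    · exact absurd (hinv.2.2.2 b r1 e1 hlt) f1
    · exact hge
  have hfree1 : pvMk b r1 ∉ short := fun hm => f1 (hinv.2.1 _ hm)
  rcases Nat.lt_trichotomy r1 r2 with h | h | h
  · exact absurd (g2 r1 hr1c h) hfree1
  · exact h
  · have hr2seen : pvMk b r2 ∈ seen := g1 r2 (by omega) h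
    exact absurd ((pvSeen_iff_short ctr seen short hinv b r2 e2).mp hr2seen) f2

theorem pvLoopB_eq_foldA (max_len : Int) :
    ∀ (names : List String) (out : PySem.Dict String String) (seen short : PySem.Set String)
      (ctr : PySem.Dict String Nat), pvInvB ctr seen short →
      pvLoopB max_len names out short ctr = (names.foldl (pvStepA max_len) (out, seen)).1 := by
  intro names
  induction names with
  | nil => intro out seen short ctr _; rfl
  | cons name rest ih =>
    intro out seen short ctr hinv
    obtain ⟨h0, h1, h2, h3⟩ := hinv
    by_cases hlen : PySem.Str.len name ≤ max_len
    · simp only [pvLoopB, List.foldl_cons, pvStepA, hlen, if_true]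
      apply ih
      refine ⟨h0, ?_, ?_, ?_⟩
      · intro s hs
        rw [PySem.Set.mem_add] at hs ⊢
        tauto
      · intro s hs
        rw [PySem.Set.mem_add] at hs
        rcases hs with hs | hs
        · rcases h2 s hs with hm | hm
          · exact Or.inl (pvMem_add _ _ _ hm)
          · exact Or.inr hm
        · exact Or.inl (by rw [hs]; simp [PySem.Set.mem_add])
      · intro b k hk1 hk2
        exact pvMem_add _ _ _ (h3 b k hk1 hk2)
    · simp only [pvLoopB, List.foldl_cons, pvStepA, hlen, if_false]
      set b := PySem.Str.slice name none (some (max_len - 4)) with hb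
      rw [← pvScan_agree ctr seen short ⟨h0, h1, h2, h3⟩ b]
      set r := pvFindA seen b 1 (seen.length + 1) with hr
      apply ih
      -- re-establish the invariant for (ctr[b] ↦ r+1, seen + pvMk b r, short)
      obtain ⟨e1, f1, g1⟩ := pvFindA_spec seen b (seen.length + 1) 1
        (by obtain ⟨i, hi, hf⟩ := pvExists_free seen b 1; exact ⟨i, hi, hf⟩)
      have hrc : ctr.getD b 1 ≤ r := by
        rcases Nat.lt_or_ge r (ctr.getD b 1) with hlt | hge
        · exact absurd (h3 b r e1 hlt) f1
        · exact hge
      have hgetD : ∀ (b' : String), b' ≠ b →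
          (ctr.insert b (r + 1)).getD b' 1 = ctr.getD b' 1 := fun b' hne =>
        PySem.Dict.getD_insert_of_ne ctr (r + 1) 1 hne
      have hgetDb : (ctr.insert b (r + 1)).getD b 1 = r + 1 := by
        rw [PySem.Dict.getD_insert_self]
      refine ⟨?_, ?_, ?_, ?_⟩
      · intro b'
        by_cases hbb : b' = b
        · subst hbb; rw [hgetDb]; omega
        · rw [hgetD b' hbb]; exact h0 b'
      · intro s hs
        exact pvMem_add _ _ _ (h1 s hs)
      · intro s hs
        rw [PySem.Set.mem_add] at hs
        rcases hs with hs | hs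
        · rcases h2 s hs with hm | ⟨b', k', hk1, hk2, heq⟩
          · exact Or.inl hm
          · refine Or.inr ⟨b', k', hk1, ?_, heq⟩
            by_cases hbb : b' = b
            · subst hbb; rw [hgetDb]; omega
            · rw [hgetD b' hbb]; exact hk2
        · refine Or.inr ⟨b, r, by omega, ?_, hs⟩
          rw [hgetDb]; omega
      · intro b' k hk1 hk2
        by_cases hbb : b' = b
        · subst hbb
          rw [hgetDb] at hk2
          rcases Nat.lt_or_ge k (ctr.getD b 1) with hk | hk
          · exact pvMem_add _ _ _ (h3 b k hk1 hk)
          · rcases Nat.lt_or_ge k r with hkr | hkr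
            · exact pvMem_add _ _ _ (g1 k (by omega) hkr)
            · have : k = r := by omega
              subst this
              simp [PySem.Set.mem_add]
        · rw [hgetD b' hbb] at hk2
          exact pvMem_add _ _ _ (h3 b' k hk1 hk2)

-- ===== VERDICT (by name: the statement is the Claim_ definition above) =====
theorem abbreviate_unique_spec : Claim_equal_abbreviate_unique := by
  intro names max_len _
  unfold Spec_abbreviate_unique abbreviate_unique abbreviate_unique_alt
  rw [pvLoopB_eq_foldA]
  refine ⟨fun b => ?_, fun s hs => (by simp [PySem.Set.empty] at hs),
    fun s hs => (by simp [PySem.Set.empty] at hs), fun b k hk1 hk2 => ?_⟩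
  · simp [PySem.Dict.getD_empty]
  · simp [PySem.Dict.getD_empty] at hk2
    omega
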